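-- pv_equiv track=rewrite | github.com/seonjuuu/mathematical-programming | Review.py | map_index
-- ===== SOURCE A (Python) =====
-- def map_index(L):
--     Lcpy = []
--     for i in L:
--         Lcpy.append(i)
--     Lcpy.sort()
--     ret = []
--     for i in Lcpy:
--         ret.append(L.index(i))
--     return ret
-- ===== SOURCE B (Python) =====
-- def map_index(L):
--     first = {}
--     count = {}
--     for i, v in enumerate(L):
--         first.setdefault(v, i)
--         count[v] = count.get(v, 0) + 1
--     ret = []
--     for v in sorted(count):
--         ret.extend([first[v]] * count[v])
--     return ret
-- ===== Notes on version B (the rewrite author's own statement) =====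
-- stated objective: faster
-- what changed: One pass builds a first-occurrence dict and a count dict, then B expands each distinct value (in sorted order) to its first index repeated count times, removing A's per-element list.index scan over the whole sorted list.
import Mathlib
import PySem

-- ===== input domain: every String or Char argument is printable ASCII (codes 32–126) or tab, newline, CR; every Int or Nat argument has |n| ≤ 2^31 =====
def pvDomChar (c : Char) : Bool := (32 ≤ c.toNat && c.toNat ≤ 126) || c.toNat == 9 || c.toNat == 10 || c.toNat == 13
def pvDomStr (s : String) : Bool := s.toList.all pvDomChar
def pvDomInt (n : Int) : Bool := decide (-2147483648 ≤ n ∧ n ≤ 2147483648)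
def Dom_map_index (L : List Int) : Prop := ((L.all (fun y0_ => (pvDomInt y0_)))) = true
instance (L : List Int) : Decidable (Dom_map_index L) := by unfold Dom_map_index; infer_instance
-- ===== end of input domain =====

-- B builds first-occurrence and count dicts in one pass and expands them over the distinct
-- values in sorted order, instead of A's list.index scan per element of the sorted list (faster).

-- ===== PORT A =====
def map_index (L : List Int) : List Int :=
  let Lcpy := L.foldl (fun acc i => acc ++ [i]) []
  let Lcpy := PySem.List.sorted Lcpy (fun x => x) false
  Lcpy.foldl (fun ret i => ret ++ [(((PySem.List.index? L i).getD 0 : Nat) : Int)]) []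

-- ===== PORT B =====
def map_index_alt (L : List Int) : List Int :=
  let st := (PySem.List.enumerate L 0).foldl
    (fun (p : PySem.Dict Int Int × PySem.Dict Int Int) iv =>
      (p.1.setdefault iv.2 iv.1, p.2.insert iv.2 (p.2.getD iv.2 0 + 1)))
    (PySem.Dict.empty, PySem.Dict.empty)
  (PySem.List.sorted st.2.keys (fun x => x) false).foldl
    (fun ret v => ret ++ PySem.List.pyRepeat [st.1.getD v 0] (st.2.getD v 0)) []

-- ===== PRECONDITION & SPEC =====
def Spec_map_index (L : List Int) (out : List Int) : Prop := out = map_index_alt L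
instance (L : List Int) (out : List Int) : Decidable (Spec_map_index L out) := by unfold Spec_map_index; infer_instance

-- ===== CLAIM (what is proved, stated in full; the proofs are below) =====
def Claim_equal_map_index : Prop := ∀ (L : List Int), Dom_map_index L → Spec_map_index L (map_index L)

-- ===== LEMMAS AND PROOFS =====

-- generic: a pair fold with independent components is the pair of the two folds
theorem pair_foldl {α β γ : Type} (f : α → γ → α) (g : β → γ → β) :
    ∀ (l : List γ) (a : α) (b : β),
      l.foldl (fun p x => (f p.1 x, g p.2 x)) (a, b) = (l.foldl f a, l.foldl g b) := by
  intro l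
  induction l with
  | nil => intro a b; rfl
  | cons x t ih => intro a b; simp [List.foldl, ih]

-- the count component: folding over enumerate ignoring the index = folding over the list
theorem foldl_enumerate_snd {α β : Type} (g : β → α → β) :
    ∀ (l : List α) (s : Int) (b : β),
      (PySem.List.enumerate l s).foldl (fun c iv => g c iv.2) b = l.foldl g b := by
  intro l
  induction l with
  | nil => intro s b; simp [PySem.List.enumerate_nil]
  | cons x t ih => intro s b; simp [PySem.List.enumerate_cons, List.foldl, ih]

-- the first-occurrence dict: get? after the setdefault fold
theorem ffold_get? :
    ∀ (l : List Int) (s : Int) (f : PySem.Dict Int Int) (v : Int),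
      ((PySem.List.enumerate l s).foldl (fun f iv => f.setdefault iv.2 iv.1) f).get? v
      = ((f.get? v).or ((PySem.List.index? l v).map (fun i => s + (i : Int)))) := by
  intro l
  induction l with
  | nil =>
    intro s f v
    simp [PySem.List.enumerate_nil, PySem.List.index?_eq_idxOf?]
  | cons x t ih =>
    intro s f v
    rw [PySem.List.enumerate_cons]
    simp only [List.foldl]
    rw [ih]
    by_cases hv : v = x
    · subst hv
      rw [PySem.List.index?_cons_self]
      rcases h : f.get? v with _ | w
      · have hc : f.contains v = false := by
          rw [PySem.Dict.contains_eq_isSome_get?, h]; rfl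
        rw [PySem.Dict.setdefault_of_not_contains _ _ hc, PySem.Dict.get?_insert_self]
        simp
      · have hc : f.contains v = true := by
          rw [PySem.Dict.contains_eq_isSome_get?, h]; rfl
        rw [PySem.Dict.setdefault_of_contains _ _ hc]
        simp [h]
    · rw [PySem.Dict.get?_setdefault_of_ne _ _ hv]
      rw [PySem.List.index?_cons_of_ne _ (fun h => hv h.symm)]
      rcases h : PySem.List.index? t v with _ | k
      · simp
      · simp only [Option.map_some]
        have : s + 1 + (k : Int) = s + ((k : Nat) + 1 : Nat) := by push_cast; ring
        simp [this]

-- the two fold rewrites specialised to B's step (first-order forms for simp)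
theorem pair_foldl_spec (l : List (Int × Int)) (a b : PySem.Dict Int Int) :
    l.foldl (fun p iv => (p.1.setdefault iv.2 iv.1, p.2.insert iv.2 (p.2.getD iv.2 0 + 1))) (a, b)
    = (l.foldl (fun f iv => f.setdefault iv.2 iv.1) a,
       l.foldl (fun c iv => c.insert iv.2 (c.getD iv.2 0 + 1)) b) :=
  pair_foldl (fun d (iv : Int × Int) => d.setdefault iv.2 iv.1)
    (fun c (iv : Int × Int) => c.insert iv.2 (c.getD iv.2 0 + 1)) l a b

theorem cfold_eq (l : List Int) (b : PySem.Dict Int Int) :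
    (PySem.List.enumerate l 0).foldl (fun c iv => c.insert iv.2 (c.getD iv.2 0 + 1)) b
    = l.foldl (fun c x => c.insert x (c.getD x 0 + 1)) b :=
  foldl_enumerate_snd (fun c x => c.insert x (c.getD x 0 + 1)) l 0 b

-- count of an element in a flatMap of replicates over a nodup list
theorem count_flatMap_replicate (n : Int → Nat) :
    ∀ (D : List Int), D.Nodup → ∀ x,
      (D.flatMap (fun v => List.replicate (n v) v)).count x = if x ∈ D then n x else 0 := by
  intro D
  induction D with
  | nil => intro _ x; simp
  | cons v D' ih =>
    intro hnd x
    rcases List.nodup_cons.mp hnd with ⟨hv, hnd'⟩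
    rw [List.flatMap_cons, List.count_append, ih hnd' x, List.count_replicate]
    by_cases hx : x = v
    · subst hx; simp [hv]
    · simp [hx, Ne.symm hx, List.mem_cons]

-- a flatMap of replicates over a strictly increasing list is weakly increasing
theorem pairwise_flatMap_replicate (n : Int → Nat) :
    ∀ (D : List Int), D.Pairwise (· < ·) →
      (D.flatMap (fun v => List.replicate (n v) v)).Pairwise (· ≤ ·) := by
  intro D
  induction D with
  | nil => intro _; simp
  | cons v D' ih =>
    intro hp
    rcases List.pairwise_cons.mp hp with ⟨hlt, hp'⟩
    rw [List.flatMap_cons]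
    refine List.pairwise_append.mpr ⟨List.pairwise_replicate.mpr (Or.inr le_rfl), ih hp', ?_⟩
    intro a ha b hb
    rcases List.mem_flatMap.mp hb with ⟨w, hw, hbw⟩
    rw [List.eq_of_mem_replicate ha, List.eq_of_mem_replicate hbw]
    exact le_of_lt (hlt w hw)

-- the grouping identity: sorted(L) is the sorted distinct values, each repeated its count
theorem sorted_eq_flatMap_replicate (L : List Int) :
    PySem.List.sorted L (fun x => x) false
      = (PySem.List.sorted (PySem.Set.ofList L) (fun x => x) false).flatMap
          (fun v => List.replicate (L.count v) v) := by
  have hperm : (PySem.List.sorted (PySem.Set.ofList L) (fun x => x) false).Perm (PySem.Set.ofList L) :=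
    PySem.List.sorted_perm _ _ _
  have hnd : (PySem.List.sorted (PySem.Set.ofList L) (fun x => x) false).Nodup :=
    hperm.nodup_iff.mpr (PySem.Set.nodup_ofList L)
  apply PySem.List.sorted_id_eq_of_perm_of_pairwise
  · rw [List.perm_iff_count]
    intro x
    rw [count_flatMap_replicate _ _ hnd x]
    by_cases hx : x ∈ L
    · simp [PySem.List.mem_sorted, PySem.Set.mem_ofList, hx]
    · simp [PySem.List.mem_sorted, PySem.Set.mem_ofList, hx, List.count_eq_zero_of_not_mem hx]
  · exact pairwise_flatMap_replicate _ _ (PySem.List.sorted_ofList_pairwise_lt L)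

theorem flatMap_replicate_singleton {α β : Type} (n : Nat) (v : α) (f : α → β) :
    (List.replicate n v).flatMap (fun x => [f x]) = List.replicate n (f v) := by
  induction n with
  | zero => rfl
  | succ m ih => simp [List.replicate_succ, ih]

theorem flatMap_congr_mem {α β : Type} (f g : α → List β) :
    ∀ (l : List α), (∀ x ∈ l, f x = g x) → l.flatMap f = l.flatMap g := by
  intro l
  induction l with
  | nil => intro _; rfl
  | cons x t ih =>
    intro h
    rw [List.flatMap_cons, List.flatMap_cons, h x (List.mem_cons_self),
        ih (fun y hy => h y (List.mem_cons_of_mem x hy))]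

-- ===== VERDICT (by name: the statement is the Claim_ definition above) =====
theorem map_index_spec : Claim_equal_map_index := by
  intro L _
  unfold Spec_map_index map_index map_index_alt
  have hcpy : L.foldl (fun acc i => acc ++ [i]) [] = L := by
    rw [PySem.List.foldl_append_eq_flatMap (g := fun i => [i])]
    simp
  simp only [hcpy, pair_foldl_spec, cfold_eq,
    PySem.Dict.foldl_insert_getD_add_one_eq_counter, PySem.Dict.keys_counter,
    PySem.List.foldl_append_eq_flatMap, List.nil_append]
  rw [sorted_eq_flatMap_replicate L, List.flatMap_assoc]
  apply flatMap_congr_mem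
  intro v hv
  have hvL : v ∈ L := by
    have := (PySem.List.mem_sorted _ _ _ _).mp hv
    simpa [PySem.Set.mem_ofList] using this
  rw [PySem.Dict.getD_counter, PySem.List.pyRepeat_singleton]
  have hidx : ∃ k, PySem.List.index? L v = some k := by
    rcases h : PySem.List.index? L v with _ | k
    · exact absurd ((PySem.List.index?_eq_none_iff _ _).mp h) (by simp [hvL])
    · exact ⟨k, rfl⟩
  rcases hidx with ⟨k, hk⟩
  have hfirst : (((PySem.List.enumerate L 0).foldl (fun f iv => f.setdefault iv.2 iv.1)
      PySem.Dict.empty).getD v 0) = (k : Int) := by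
    rw [PySem.Dict.getD_eq_get?_getD, ffold_get?, hk]
    simp
  rw [hfirst, flatMap_replicate_singleton]
  rw [PySem.List.index?_eq_idxOf?] at hk
  simp [hk]
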